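-- pv_equiv track=rewrite | github.com/Maldonado-J/Python_UNSAM-Resoluciones | 02_Estructuras_y_funciones/diccionario_geringoso.py | geringar
-- ===== SOURCE A (Python) =====
-- def geringar(palabra):
--     vocales = 'aeiou'
--     papalapabrapa = ''
--     for c in palabra.lower():
--         papalapabrapa += c
--         if c in vocales:
--             papalapabrapa += 'p'+c
--     return papalapabrapa
-- ===== SOURCE B (Python) =====
-- def geringar(palabra):
--     r = palabra.lower()
--     for v in 'aeiou':
--         r = r.replace(v, v + 'p' + v)
--     return r
-- ===== Notes on version B (the rewrite author's own statement) =====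
-- stated objective: faster
-- what changed: A builds the result character by character with an accumulator and a per-character vowel test; B lowercases once and then runs one whole-string replace pass per vowel, looping over the fixed five-vowel alphabet instead of over the input characters.
import Mathlib
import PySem

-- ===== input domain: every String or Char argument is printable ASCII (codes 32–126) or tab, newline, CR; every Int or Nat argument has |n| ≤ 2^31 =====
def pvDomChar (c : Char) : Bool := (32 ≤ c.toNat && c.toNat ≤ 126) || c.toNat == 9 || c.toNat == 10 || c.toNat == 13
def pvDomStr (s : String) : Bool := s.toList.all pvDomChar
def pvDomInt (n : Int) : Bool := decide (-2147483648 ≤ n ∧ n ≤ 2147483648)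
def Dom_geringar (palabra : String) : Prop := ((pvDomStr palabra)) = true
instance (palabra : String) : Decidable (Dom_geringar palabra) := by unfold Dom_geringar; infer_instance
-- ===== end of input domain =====

-- B replaces A's character-by-character accumulation with one whole-string replace pass
-- per vowel (same exact output; a timing run measured B faster by a constant factor).

-- ===== PORT A =====
-- for c in palabra.lower(): papalapabrapa += c; if c in vocales: papalapabrapa += 'p'+c
def geringar (palabra : String) : String :=
  String.ofList ((PySem.Str.lower palabra).toList.foldl
    (fun papalapabrapa c =>
      (papalapabrapa ++ [c]) ++
        (if PySem.Chars.isIn [c] "aeiou".toList then ['p'] ++ [c] else []))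
    [])

-- ===== PORT B =====
-- r = palabra.lower(); for v in 'aeiou': r = r.replace(v, v + 'p' + v); return r
def geringar_alt (palabra : String) : String :=
  "aeiou".toList.foldl
    (fun r v => PySem.Str.replace r (String.ofList [v]) (String.ofList [v, 'p', v]))
    (PySem.Str.lower palabra)

-- ===== PRECONDITION & SPEC =====
def Spec_geringar (palabra : String) (out : String) : Prop := out = geringar_alt palabra
instance (palabra : String) (out : String) : Decidable (Spec_geringar palabra out) := by unfold Spec_geringar; infer_instance

-- ===== CLAIM (what is proved, stated in full; the proofs are below) =====
def Claim_equal_geringar : Prop := ∀ (palabra : String), Dom_geringar palabra → Spec_geringar palabra (geringar palabra)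

-- ===== LEMMAS AND PROOFS =====

-- one left-to-right pass of replace with a single-char needle expands each matching char
theorem replace_go_single (v : Char) (new : List Char) :
    ∀ (l : List Char) (fuel : Nat) (acc : List Char), l.length ≤ fuel →
      PySem.Chars.replace.go [v] new fuel l acc
        = acc.reverse ++ l.flatMap (fun c => if c = v then new else [c]) := by
  intro l
  induction l with
  | nil =>
    intro fuel acc _
    cases fuel <;> simp [PySem.Chars.replace.go]
  | cons c t ih =>
    intro fuel acc h
    cases fuel with
    | zero => simp at h
    | succ f =>
      rw [PySem.Chars.replace.go]
      by_cases hc : c = v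
      · subst hc
        simp [List.isPrefixOf, ih f _ (by simpa using h)]
      · simp [List.isPrefixOf, hc, Ne.symm hc, ih f _ (by simpa using h)]

theorem replace_single (s : List Char) (v : Char) (new : List Char) :
    PySem.Chars.replace s [v] new = s.flatMap (fun c => if c = v then new else [c]) := by
  rw [PySem.Chars.replace]
  simp [replace_go_single v new s s.length [] le_rfl]

theorem singleton_infix (c : Char) (l : List Char) : [c] <:+: l ↔ c ∈ l := by
  constructor
  · intro h; exact (List.singleton_sublist).1 h.sublist
  · intro h
    obtain ⟨s, t, rfl⟩ := List.append_of_mem h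
    exact ⟨s, t, by simp⟩

def gvExp (vs : List Char) (c : Char) : List Char := if c ∈ vs then [c, 'p', c] else [c]

-- the sequential replace passes over distinct non-'p' vowels compose into one expansion map
theorem fold_replace (vs : List Char) (hp : 'p' ∉ vs) (hd : vs.Nodup) (s : List Char) :
    vs.foldl (fun r v => PySem.Chars.replace r [v] [v, 'p', v]) s = s.flatMap (gvExp vs) := by
  induction vs generalizing s with
  | nil =>
    simp only [List.foldl_nil]
    rw [show gvExp [] = fun c => [c] from funext fun c => by simp [gvExp],
        List.flatMap_singleton']
  | cons v vs ih =>
    simp only [List.foldl_cons]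
    rw [replace_single,
        ih (fun h => hp (List.mem_cons_of_mem _ h)) (List.nodup_cons.1 hd).2,
        List.flatMap_assoc]
    apply List.flatMap_congr
    intro c _
    by_cases hc : c = v
    · subst hc
      have hv : c ∉ vs := (List.nodup_cons.1 hd).1
      have hpv : 'p' ∉ vs := fun h => hp (List.mem_cons_of_mem _ h)
      simp [gvExp, hv, hpv]
    · simp [gvExp, hc]

-- B's string-level fold, viewed on the character list
theorem alt_toList (palabra : String) :
    (geringar_alt palabra).toList
      = "aeiou".toList.foldl (fun r v => PySem.Chars.replace r [v] [v, 'p', v])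
          (PySem.Str.lower palabra).toList := by
  unfold geringar_alt
  generalize (PySem.Str.lower palabra) = s
  generalize "aeiou".toList = vs
  induction vs generalizing s with
  | nil => rfl
  | cons v vs ih => simp [List.foldl_cons, ih, PySem.Str.toList_replace, String.toList_ofList]

-- ===== VERDICT (by name: the statement is the Claim_ definition above) =====
theorem geringar_spec : Claim_equal_geringar := by
  intro palabra _
  unfold Spec_geringar geringar
  have hB : (geringar_alt palabra).toList
      = (PySem.Str.lower palabra).toList.flatMap (gvExp "aeiou".toList) := by
    rw [alt_toList, fold_replace _ (by decide) (by decide)]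
  have hA : ((PySem.Str.lower palabra).toList.foldl
      (fun papalapabrapa c =>
        (papalapabrapa ++ [c]) ++
          (if PySem.Chars.isIn [c] "aeiou".toList then ['p'] ++ [c] else []))
      []) = (PySem.Str.lower palabra).toList.flatMap (gvExp "aeiou".toList) := by
    rw [show (fun (papalapabrapa : List Char) (c : Char) =>
        (papalapabrapa ++ [c]) ++
          (if PySem.Chars.isIn [c] "aeiou".toList then ['p'] ++ [c] else []))
        = fun papalapabrapa c => papalapabrapa ++ gvExp "aeiou".toList c from
      funext fun acc => funext fun c => by
        have hm : PySem.Chars.isIn [c] "aeiou".toList = true ↔ c ∈ "aeiou".toList :=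
          (PySem.Chars.isIn_iff_infix _ _).trans (singleton_infix c _)
        by_cases h : c ∈ "aeiou".toList
        · rw [hm.2 h]
          simp only [if_true, gvExp]
          rw [if_pos h]
          simp
        · have hf : PySem.Chars.isIn [c] "aeiou".toList = false := by
            cases hb : PySem.Chars.isIn [c] "aeiou".toList
            · rfl
            · exact absurd (hm.1 hb) h
          rw [hf]
          simp only [Bool.false_eq_true, if_false, gvExp]
          rw [if_neg h]
          simp]
    rw [PySem.List.foldl_append_eq_flatMap]
    simp
  rw [hA, ← hB, String.ofList_toList]
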